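-- pv_equiv track=rewrite | github.com/YuceAuto/UrunBot | app.py | extract_markdown_tables_from_text
-- ===== SOURCE A (Python) =====
-- def extract_markdown_tables_from_text(text):
--     lines = text.splitlines()
--     tables = []
--     current_table = []
--     for line in lines:
--         if '|' in line.strip():
--             current_table.append(line)
--         else:
--             if current_table:
--                 tables.append('\n'.join(current_table))
--                 current_table = []
--     if current_table:
--         tables.append('\n'.join(current_table))
--     return tables
-- ===== SOURCE B (Python) =====
-- def _span(pred, xs):
--     i = 0
--     while i < len(xs) and pred(xs[i]):
--         i += 1
--     return xs[:i], xs[i:]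
--
-- def extract_markdown_tables_from_text(text):
--     is_table = lambda line: '|' in line.strip()
--     tables = []
--     rest = text.splitlines()
--     while rest:
--         if is_table(rest[0]):
--             run, rest = _span(is_table, rest)
--             tables.append('\n'.join(run))
--         else:
--             rest = rest[1:]
--     return tables
-- ===== Notes on version B (the rewrite author's own statement) =====
-- stated objective: simpler
-- what changed: Replaces the accumulator state machine with its duplicated post-loop flush by splitting the line list into maximal runs of table lines with a span helper, joining each run directly.
import Mathlib
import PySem

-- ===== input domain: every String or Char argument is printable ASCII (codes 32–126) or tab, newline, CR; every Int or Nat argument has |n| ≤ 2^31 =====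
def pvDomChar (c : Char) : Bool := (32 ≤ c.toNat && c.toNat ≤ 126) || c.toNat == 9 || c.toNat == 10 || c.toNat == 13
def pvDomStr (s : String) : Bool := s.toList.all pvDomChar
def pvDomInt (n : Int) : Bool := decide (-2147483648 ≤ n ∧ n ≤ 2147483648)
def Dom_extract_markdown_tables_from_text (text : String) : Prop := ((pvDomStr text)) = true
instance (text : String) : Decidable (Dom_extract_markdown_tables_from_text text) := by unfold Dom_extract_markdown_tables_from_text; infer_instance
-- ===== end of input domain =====

-- B replaces A's accumulator state machine (with its duplicated post-loop flush) by
-- splitting the line list into maximal runs of table lines; objective: simpler.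

-- ===== PORT A =====
-- step of A's for-loop: state = (tables, current_table)
def pvStepA (st : List String × List String) (line : String) : List String × List String :=
  if PySem.Str.isIn "|" (PySem.Str.strip line) then (st.1, st.2 ++ [line])
  else if st.2 ≠ [] then (st.1 ++ [PySem.Str.join "\n" st.2], []) else st

def extract_markdown_tables_from_text (text : String) : List String :=
  let lines := PySem.Str.splitlines text
  let st := lines.foldl pvStepA ([], [])
  if st.2 ≠ [] then st.1 ++ [PySem.Str.join "\n" st.2] else st.1

-- ===== PORT B =====
def pvIsTable (line : String) : Bool := PySem.Str.isIn "|" (PySem.Str.strip line)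

-- B's while-loop over the remaining lines; `_span` is List.takeWhile / List.dropWhile
def pvGoB : List String → List String
  | [] => []
  | line :: rest =>
    if pvIsTable line then
      PySem.Str.join "\n" (line :: rest.takeWhile pvIsTable) :: pvGoB (rest.dropWhile pvIsTable)
    else pvGoB rest
termination_by l => l.length
decreasing_by
  · exact Nat.lt_succ_of_le (List.length_dropWhile_le _ _)
  · simp

def extract_markdown_tables_from_text_alt (text : String) : List String :=
  pvGoB (PySem.Str.splitlines text)

-- ===== PRECONDITION & SPEC =====
def Spec_extract_markdown_tables_from_text (text : String) (out : List String) : Prop := out = extract_markdown_tables_from_text_alt text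
instance (text : String) (out : List String) : Decidable (Spec_extract_markdown_tables_from_text text out) := by unfold Spec_extract_markdown_tables_from_text; infer_instance

-- ===== CLAIM (what is proved, stated in full; the proofs are below) =====
def Claim_equal_extract_markdown_tables_from_text : Prop := ∀ (text : String), Dom_extract_markdown_tables_from_text text → Spec_extract_markdown_tables_from_text text (extract_markdown_tables_from_text text)

-- ===== LEMMAS AND PROOFS =====

-- flush of a pending run
def pvFlush (cur : List String) : List String :=
  if cur ≠ [] then [PySem.Str.join "\n" cur] else []

-- pvGoB equals "flush the leading run, then recurse", for any list
theorem pvGoB_eq (lines : List String) :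
    pvGoB lines = pvFlush (lines.takeWhile pvIsTable) ++ pvGoB (lines.dropWhile pvIsTable) := by
  cases lines with
  | nil => simp [pvGoB, pvFlush]
  | cons l ls =>
    by_cases hp : pvIsTable l
    · rw [pvGoB]
      simp [hp, pvFlush]
    · simp [hp, pvFlush]

-- invariant of A's fold: tables already emitted are a prefix, the rest depends only on (cur, lines)
theorem pvFoldA_inv (lines : List String) : ∀ (tables cur : List String),
    (let st := lines.foldl pvStepA (tables, cur)
     if st.2 ≠ [] then st.1 ++ [PySem.Str.join "\n" st.2] else st.1)
    = tables ++ (pvFlush (cur ++ lines.takeWhile pvIsTable) ++ pvGoB (lines.dropWhile pvIsTable)) := by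
  induction lines with
  | nil =>
    intro tables cur
    simp only [List.foldl, List.takeWhile_nil, List.dropWhile_nil, List.append_nil, pvGoB, pvFlush]
    split <;> simp
  | cons l ls ih =>
    intro tables cur
    by_cases hp : pvIsTable l
    · have hA : PySem.Str.isIn "|" (PySem.Str.strip l) = true := by simpa [pvIsTable] using hp
      simp only [List.foldl, pvStepA, hA, if_pos]
      rw [ih tables (cur ++ [l])]
      simp [hp]
    · have hA : ¬ PySem.Str.isIn "|" (PySem.Str.strip l) = true := by simpa [pvIsTable] using hp
      simp only [List.foldl, pvStepA, hA]
      simp only [List.takeWhile_cons, List.dropWhile_cons, hp, Bool.false_eq_true, if_false]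
      have hgo : pvGoB (l :: ls) = pvGoB ls := by
        rw [pvGoB]; simp [hp]
      rw [hgo]
      by_cases hc : cur = []
      · subst hc
        rw [if_neg (by simp : ¬([] : List String) ≠ [])]
        rw [ih tables []]
        simp only [List.nil_append, pvFlush]
        simpa [pvFlush] using (pvGoB_eq ls).symm
      · rw [if_pos hc, ih (tables ++ [PySem.Str.join "\n" cur]) []]
        simp [pvFlush, hc]
        simpa [pvFlush] using (pvGoB_eq ls).symm

-- ===== VERDICT (by name: the statement is the Claim_ definition above) =====
theorem extract_markdown_tables_from_text_spec : Claim_equal_extract_markdown_tables_from_text := by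
  intro text _
  unfold Spec_extract_markdown_tables_from_text extract_markdown_tables_from_text extract_markdown_tables_from_text_alt
  rw [pvFoldA_inv (PySem.Str.splitlines text) [] []]
  rw [pvGoB_eq (PySem.Str.splitlines text)]
  simp
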